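-- pv_equiv track=rewrite | github.com/mattopmaster/sgg-mod-format | SGGMI/SGGMI.py | modfile_splitlines
-- ===== SOURCE A (Python) =====
-- def modfile_splitlines(body):
--     glines = map(lambda s: s.strip().split('"'), body.split("\n"))
--     lines = []
--     li = -1
--     mlcom = False
--
--     def gp(group, lines, li, mlcom, even):
--         if mlcom:
--             tgroup = group.split(modfile_mlcom_end, 1)
--             if len(tgroup) == 1:  # still commented, carry on
--                 even = not even
--                 return (lines, li, mlcom, even)
--             else:  # comment ends, if a quote, even is disrupted
--                 even = False
--                 mlcom = False
--                 group = tgroup[1]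
--         if even:
--             lines[li] += '"' + group + '"'
--         else:
--             tgroup = group.split(modfile_comment, 1)
--             tline = tgroup[0].split(modfile_mlcom_start, 1)
--             tgroup = tline[0].split(modfile_linebreak)
--             lines[li] += tgroup[0]  # uncommented line
--             for g in tgroup[1:]:  # new uncommented lines
--                 lines.append(g)
--                 li += 1
--             if len(tline) > 1:  # comment begins
--                 mlcom = True
--                 lines, li, mlcom, even = gp(tline[1], lines, li, mlcom, even)
--         return (lines, li, mlcom, even)
--
--     for groups in glines:
--         even = False
--         li += 1
--         lines.append("")
--         for group in groups:
--             lines, li, mlcom, even = gp(group, lines, li, mlcom, even)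
--             even = not even
--     return lines
--
-- modfile_mlcom_start = "-:"
--
-- modfile_mlcom_end = ":-"
--
-- modfile_comment = "::"
--
-- modfile_linebreak = ";"
-- ===== SOURCE B (Python) =====
-- def modfile_splitlines(body):
--     lines = []
--     mlcom = False
--     for raw in body.split("\n"):
--         lines.append("")
--         even = False
--         for g in raw.strip().split('"'):
--             if mlcom:
--                 j = g.find(":-")
--                 if j < 0:
--                     continue
--                 mlcom = False
--                 even = False
--                 g = g[j + 2:]
--             if even:
--                 lines[-1] += '"' + g + '"'
--             else:
--                 cut = g.find("::")
--                 h = g if cut < 0 else g[:cut]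
--                 while True:
--                     m = h.find("-:")
--                     seg = h if m < 0 else h[:m]
--                     parts = seg.split(";")
--                     lines[-1] += parts[0]
--                     lines.extend(parts[1:])
--                     if m < 0:
--                         break
--                     t = h[m + 2:]
--                     j = t.find(":-")
--                     if j < 0:
--                         mlcom = True
--                         break
--                     h = t[j + 2:]
--             even = not even
--     return lines
-- ===== Notes on version B (the rewrite author's own statement) =====
-- stated objective: simpler
-- what changed: Replaces A's recursive nested helper gp over split()-produced fragment lists with li index bookkeeping by a flat iterative scanner: per stripped line and quote-group, a find()-cursor while-loop handles comment truncation, multi-line comment spans and line-break splitting, appending to the last output line in place.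
import Mathlib
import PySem

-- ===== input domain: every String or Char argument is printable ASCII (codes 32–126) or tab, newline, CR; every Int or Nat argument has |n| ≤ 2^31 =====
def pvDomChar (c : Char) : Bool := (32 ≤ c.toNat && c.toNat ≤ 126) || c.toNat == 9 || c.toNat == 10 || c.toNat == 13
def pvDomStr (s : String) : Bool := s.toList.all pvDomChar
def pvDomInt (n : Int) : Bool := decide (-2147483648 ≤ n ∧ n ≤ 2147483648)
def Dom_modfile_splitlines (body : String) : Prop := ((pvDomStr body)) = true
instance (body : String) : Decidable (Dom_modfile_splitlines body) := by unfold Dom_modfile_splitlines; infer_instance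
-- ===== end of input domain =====

-- B re-implements the parser as a flat iterative scanner (find + slices, appending to lines[-1])
-- instead of A's recursive helper gp with split chains and li index bookkeeping; same return value.

-- ===== PORT A =====

-- find/split facts used by the ports' termination arguments (cited in decreasing_by).
theorem pvFindGoShift (sub : List Char) (hsub : sub ≠ []) :
    ∀ (l : List Char) (k : Nat), PySem.Chars.find.go sub l k =
      if PySem.Chars.find l sub = -1 then -1 else PySem.Chars.find l sub + k := by
  intro l
  induction l with
  | nil =>
      intro k
      have he : sub.isEmpty = false := by simp [hsub]
      simp [PySem.Chars.find.go, PySem.Chars.find, he]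
  | cons c t ih =>
      intro k
      by_cases hp : sub.isPrefixOf (c :: t) = true
      · simp [PySem.Chars.find.go, PySem.Chars.find, hp]
      · have h0 : PySem.Chars.find (c :: t) sub = PySem.Chars.find.go sub t 1 := by
          simp [PySem.Chars.find, PySem.Chars.find.go, hp]
        rw [PySem.Chars.find.go]
        simp only [hp, if_false, Bool.false_eq_true]
        rw [ih (k + 1), h0, ih 1]
        by_cases hf : PySem.Chars.find t sub = -1
        · simp [hf]
        · have hb := PySem.Chars.neg_one_le_find t sub
          simp only [if_neg hf]
          rw [if_neg (by push_cast; omega : ¬ PySem.Chars.find t sub + ((1 : Nat) : Int) = -1)]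
          push_cast
          omega

theorem pvFindCons (sub : List Char) (hsub : sub ≠ []) (c : Char) (t : List Char) :
    PySem.Chars.find (c :: t) sub =
      if sub.isPrefixOf (c :: t) = true then 0
      else if PySem.Chars.find t sub = -1 then -1 else PySem.Chars.find t sub + 1 := by
  by_cases hp : sub.isPrefixOf (c :: t) = true
  · simp [PySem.Chars.find, PySem.Chars.find.go, hp]
  · have : PySem.Chars.find (c :: t) sub = PySem.Chars.find.go sub t 1 := by
      simp [PySem.Chars.find, PySem.Chars.find.go, hp]
    rw [this, pvFindGoShift sub hsub t 1]
    simp [hp]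

theorem pvFindNil (sub : List Char) (hsub : sub ≠ []) : PySem.Chars.find [] sub = -1 := by
  simp [PySem.Chars.find, PySem.Chars.find.go, List.isEmpty_iff, hsub]

-- s.split(sep, 1) characterised by s.find(sep).
theorem pvSplitOnMaxGoOne (sep : List Char) (hsub : sep ≠ []) :
    ∀ (fuel : Nat) (l cur : List Char) (acc : List (List Char)), l.length < fuel →
      PySem.Chars.splitOnMax.go sep fuel 1 l cur acc =
        if PySem.Chars.find l sep = -1 then acc.reverse ++ [cur.reverse ++ l]
        else acc.reverse ++ [cur.reverse ++ l.take (PySem.Chars.find l sep).toNat,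
              l.drop ((PySem.Chars.find l sep).toNat + sep.length)] := by
  intro fuel
  induction fuel with
  | zero => intro l cur acc h; omega
  | succ fuel ih =>
      intro l cur acc h
      match l with
      | [] =>
          rw [PySem.Chars.splitOnMax.go]
          simp [pvFindNil sep hsub]
          omega
      | c :: t =>
          rw [PySem.Chars.splitOnMax.go]
          by_cases hp : sep.isPrefixOf (c :: t) = true
          · simp only [hp, if_true, Nat.one_ne_zero, if_false]
            have hfind : PySem.Chars.find (c :: t) sep = 0 := by
              rw [pvFindCons sep hsub]; simp [hp]
            -- inner call with maxsplit 0 returns immediately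
            have hgo0 : ∀ (fuel' : Nat) (l' cur' : List Char) (acc' : List (List Char)),
                PySem.Chars.splitOnMax.go sep fuel' 0 l' cur' acc' =
                  ((cur'.reverse ++ l') :: acc').reverse := by
              intro fuel' l' cur' acc'
              match fuel', l' with
              | 0, _ => rw [PySem.Chars.splitOnMax.go]
              | fuel' + 1, [] => rw [PySem.Chars.splitOnMax.go]; simp; all_goals omega
              | fuel' + 1, c' :: t' => rw [PySem.Chars.splitOnMax.go]; simp
            rw [hgo0]
            simp [hfind]
          · simp only [hp, Bool.false_eq_true, if_false, Nat.one_ne_zero]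
            have ht : t.length < fuel := by simp at h; omega
            rw [ih t (c :: cur) acc ht, pvFindCons sep hsub]
            simp only [hp, Bool.false_eq_true, if_false]
            by_cases hf : PySem.Chars.find t sep = -1
            · simp [hf]
            · have hge : 0 ≤ PySem.Chars.find t sep := by
                have := PySem.Chars.neg_one_le_find t sep; omega
              simp only [hf, if_false, if_neg (by omega : ¬ PySem.Chars.find t sep + 1 = -1)]
              have h1 : (PySem.Chars.find t sep + 1).toNat = (PySem.Chars.find t sep).toNat + 1 := by omega
              have h2 : (PySem.Chars.find t sep).toNat + 1 + sep.length
                  = ((PySem.Chars.find t sep).toNat + sep.length) + 1 := by omega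
              simp [h1, h2, List.take_succ_cons, List.drop_succ_cons]

theorem pvSplitOne (cs sep : List Char) (hsub : sep ≠ []) :
    PySem.Chars.splitOnMax cs sep 1 =
      if PySem.Chars.find cs sep = -1 then [cs]
      else [cs.take (PySem.Chars.find cs sep).toNat,
            cs.drop ((PySem.Chars.find cs sep).toNat + sep.length)] := by
  rw [PySem.Chars.splitOnMax]
  simp only [(by decide : ¬ ((1 : Int) < 0)), if_false, Int.toNat_one]
  rw [pvSplitOnMaxGoOne sep hsub (cs.length + 1) cs [] [] (by omega)]
  by_cases hf : PySem.Chars.find cs sep = -1 <;> simp [hf]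

theorem pvSplitOneLenLt (cs sep : List Char) (hsub : sep ≠ [])
    (h : (PySem.Chars.splitOnMax cs sep 1).length ≠ 1) :
    ((PySem.Chars.splitOnMax cs sep 1).getD 1 []).length < cs.length := by
  rw [pvSplitOne cs sep hsub] at h ⊢
  by_cases hf : PySem.Chars.find cs sep = -1
  · simp [hf] at h
  · have hge : 0 ≤ PySem.Chars.find cs sep := by
      have := PySem.Chars.neg_one_le_find cs sep; omega
    have hne : cs ≠ [] := by
      intro hcs; rw [hcs, pvFindNil sep hsub] at hf; exact hf rfl
    have hcs : 0 < cs.length := List.length_pos_iff.mpr hne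
    have hs : 0 < sep.length := List.length_pos_iff.mpr hsub
    simp only [hf, if_false, List.getD, List.getElem?_cons_succ, List.getElem?_cons_zero]
    simp [List.length_drop]
    omega

theorem pvSplitOneHeadLe (cs sep : List Char) (hsub : sep ≠ []) :
    ((PySem.Chars.splitOnMax cs sep 1).headD []).length ≤ cs.length := by
  rw [pvSplitOne cs sep hsub]
  by_cases hf : PySem.Chars.find cs sep = -1
  · simp [hf]
  · simp [hf, List.length_take]

-- lines[li] += x  (Python index; li is always len-1 here, so out-of-range is unreachable)
def pvAddAt (lines : List (List Char)) (li : Int) (x : List Char) : List (List Char) :=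
  let i : Int := if li < 0 then (lines.length : Int) + li else li
  lines.modify i.toNat (fun s => s ++ x)

-- the nested helper gp of A; the fall-through after a closed multi-line comment re-enters
-- with mlcom=false, even=false, exactly as the Python assignment-and-fall-through does
def gpA (group : List Char) (lines : List (List Char)) (li : Int) (mlcom even : Bool) :
    List (List Char) × Int × Bool × Bool :=
  if mlcom then
    let tgroup := PySem.Chars.splitOnMax group [':', '-'] 1
    if hst : tgroup.length = 1 then (lines, li, mlcom, !even)
    else gpA (tgroup.getD 1 []) lines li false false
  else if even then
    (pvAddAt lines li ('"' :: group ++ ['"']), li, mlcom, even)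
  else
    let tgroup := PySem.Chars.splitOnMax group [':', ':'] 1
    let tline := PySem.Chars.splitOnMax (tgroup.headD []) ['-', ':'] 1
    let tg2 := PySem.Chars.splitOn (tline.headD []) [';']
    let lines1 := pvAddAt lines li (tg2.headD [])
    let lines2 := lines1 ++ tg2.tail
    let li2 := li + (tg2.tail.length : Int)
    if hrec : tline.length > 1 then gpA (tline.getD 1 []) lines2 li2 true even
    else (lines2, li2, false, even)
termination_by group.length
decreasing_by
  · exact pvSplitOneLenLt group [':', '-'] (by simp) hst
  · have h2' : 1 < (PySem.Chars.splitOnMax ((PySem.Chars.splitOnMax group [':', ':'] 1).headD [])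
        ['-', ':'] 1).length := hrec
    exact lt_of_lt_of_le
      (pvSplitOneLenLt ((PySem.Chars.splitOnMax group [':', ':'] 1).headD []) ['-', ':'] (by simp)
        (by omega))
      (pvSplitOneHeadLe group [':', ':'] (by simp))

def modfile_splitlines (body : String) : List String :=
  let glines := (PySem.Chars.splitOn body.toList ['\n']).map
    (fun s => PySem.Chars.splitOn (PySem.Chars.strip s) ['"'])
  let res := glines.foldl
    (fun st groups =>
      let lines := st.1 ++ [[]]
      let li := st.2.1 + 1
      let inner := groups.foldl
        (fun st2 group =>
          let r := gpA group st2.1 st2.2.1 st2.2.2.1 st2.2.2.2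
          (r.1, r.2.1, r.2.2.1, !r.2.2.2))
        (lines, li, st.2.2, false)
      (inner.1, inner.2.1, inner.2.2.1))
    (([] : List (List Char)), (-1 : Int), false)
  res.1.map (fun cs => String.ofList cs)

-- ===== PORT B =====

-- lines[-1] += x (lines is never empty when used)
def pvAddLast (lines : List (List Char)) (x : List Char) : List (List Char) :=
  lines.modify (lines.length - 1) (fun s => s ++ x)

-- the inner while-loop of B: scan h for "-:" / ":-", emitting ";"-separated pieces
def scanUnq (h : List Char) (lines : List (List Char)) : List (List Char) × Bool :=
  let m := PySem.Chars.find h ['-', ':']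
  let seg := if m < 0 then h else h.take m.toNat
  let parts := PySem.Chars.splitOn seg [';']
  let lines1 := pvAddLast lines (parts.headD [])
  let lines2 := lines1 ++ parts.tail
  if hm : m < 0 then (lines2, false)
  else
    let t := h.drop (m.toNat + 2)
    let j := PySem.Chars.find t [':', '-']
    if j < 0 then (lines2, true)
    else scanUnq (t.drop (j.toNat + 2)) lines2
termination_by h.length
decreasing_by
  have hm' : ¬ PySem.Chars.find h ['-', ':'] < 0 := hm
  have hne : h ≠ [] := by
    intro h0
    rw [h0, pvFindNil ['-', ':'] (by simp)] at hm'
    omega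
  have h1 : 0 < h.length := List.length_pos_iff.mpr hne
  simp only [List.length_drop]
  omega

-- comment cut + scan: B's handling of an uncommented group
def altCore (g : List Char) (lines : List (List Char)) : List (List Char) × Bool :=
  let cut := PySem.Chars.find g [':', ':']
  let h := if cut < 0 then g else g.take cut.toNat
  scanUnq h lines

-- B's per-group step; returns (lines, mlcom, even)
def altGroup (g : List Char) (lines : List (List Char)) (mlcom even : Bool) :
    List (List Char) × Bool × Bool :=
  if mlcom then
    let j := PySem.Chars.find g [':', '-']
    if j < 0 then (lines, true, even)
    else
      let r := altCore (g.drop (j.toNat + 2)) lines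
      (r.1, r.2, true)
  else if even then
    (pvAddLast lines ('"' :: g ++ ['"']), false, false)
  else
    let r := altCore g lines
    (r.1, r.2, true)

def modfile_splitlines_alt (body : String) : List String :=
  let res := (PySem.Chars.splitOn body.toList ['\n']).foldl
    (fun st raw =>
      let lines := st.1 ++ [[]]
      let groups := PySem.Chars.splitOn (PySem.Chars.strip raw) ['"']
      let inner := groups.foldl
        (fun st2 g => altGroup g st2.1 st2.2.1 st2.2.2)
        (lines, st.2, false)
      (inner.1, inner.2.1))
    (([] : List (List Char)), false)
  res.1.map (fun cs => String.ofList cs)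

-- ===== PRECONDITION & SPEC =====
def Spec_modfile_splitlines (body : String) (out : List String) : Prop := out = modfile_splitlines_alt body
instance (body : String) (out : List String) : Decidable (Spec_modfile_splitlines body out) := by unfold Spec_modfile_splitlines; infer_instance

-- ===== CLAIM (what is proved, stated in full; the proofs are below) =====
def Claim_equal_modfile_splitlines : Prop := ∀ (body : String), Dom_modfile_splitlines body → Spec_modfile_splitlines body (modfile_splitlines body)

-- ===== LEMMAS AND PROOFS =====

theorem pvFindNegIff (l sub : List Char) : PySem.Chars.find l sub < 0 ↔ PySem.Chars.find l sub = -1 := by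
  have := PySem.Chars.neg_one_le_find l sub
  omega


theorem pvSplitOne2 (cs : List Char) (a b : Char) :
    PySem.Chars.splitOnMax cs [a, b] 1 =
      if PySem.Chars.find cs [a, b] = -1 then [cs]
      else [cs.take (PySem.Chars.find cs [a, b]).toNat,
            cs.drop ((PySem.Chars.find cs [a, b]).toNat + 2)] := by
  simpa using pvSplitOne cs [a, b] (by simp)

theorem pvNoInfixDrop (sep h : List Char) (k : Nat) (hno : ¬ sep <:+: h) :
    ¬ sep <:+: h.drop k :=
  fun hi => hno (hi.trans (List.drop_suffix k h).isInfix)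

theorem pvNoInfixTake (t sep : List Char) (hsub : sep ≠ [])
    (hf : 0 ≤ PySem.Chars.find t sep) :
    ¬ sep <:+: t.take (PySem.Chars.find t sep).toNat := by
  intro hi
  have hex : ∃ i, sep <+: (t.take (PySem.Chars.find t sep).toNat).drop i :=
    (PySem.Chars.exists_prefix_drop_iff_isIn sep _).mpr
      ((PySem.Chars.isIn_iff_infix sep _).mpr hi)
  obtain ⟨i, hp⟩ := hex
  by_cases hlt : i < (PySem.Chars.find t sep).toNat
  · have hp' : sep <+: t.drop i := by
      have h1 : (t.take (PySem.Chars.find t sep).toNat).drop i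
          = (t.drop i).take ((PySem.Chars.find t sep).toNat - i) := by
        rw [List.drop_take]
      rw [h1] at hp
      exact hp.trans (List.take_prefix _ _)
    exact (PySem.Chars.find_spec hf).2 i hlt hp'
  · have h0 : (t.take (PySem.Chars.find t sep).toNat).drop i = [] := by
      have hle : (t.take (PySem.Chars.find t sep).toNat).length ≤ (PySem.Chars.find t sep).toNat := by
        simp [List.length_take]
      exact List.drop_eq_nil_of_le (by omega)
    rw [h0] at hp
    have hlen := List.IsPrefix.length_le hp
    simp at hlen
    exact hsub hlen

-- the part of a group before its first "::" contains no "::"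
theorem pvCutNoInfix (t : List Char) :
    ¬ [':', ':'] <:+: (if PySem.Chars.find t [':', ':'] < 0 then t
        else t.take (PySem.Chars.find t [':', ':']).toNat) := by
  by_cases hf : PySem.Chars.find t [':', ':'] < 0
  · rw [if_pos hf]
    exact (PySem.Chars.find_eq_neg_one_iff t [':', ':']).mp ((pvFindNegIff _ _).mp hf)
  · rw [if_neg hf]
    exact pvNoInfixTake t [':', ':'] (by simp) (by omega)

theorem pvAddEq (lines : List (List Char)) (x : List Char) (hne : lines ≠ []) :
    pvAddAt lines ((lines.length : Int) - 1) x = pvAddLast lines x := by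
  have h1 : 0 < lines.length := List.length_pos_iff.mpr hne
  have h2 : ¬ ((lines.length : Int) - 1 < 0) := by omega
  have h3 : ((lines.length : Int) - 1).toNat = lines.length - 1 := by omega
  simp [pvAddAt, pvAddLast, h2, h3]

@[simp] theorem pvAddLast_length (lines : List (List Char)) (x : List Char) :
    (pvAddLast lines x).length = lines.length := by
  simp [pvAddLast]

-- core lemma: A's gp on an uncommented group with no "::" equals B's scan loop
-- unfolding equations for single branches of gpA and scanUnq
theorem gpA_mlcom_stay (g : List Char) (lines : List (List Char)) (li : Int) (e : Bool)
    (hj : PySem.Chars.find g [':', '-'] = -1) :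
    gpA g lines li true e = (lines, li, true, !e) := by
  rw [gpA]
  simp [pvSplitOne2, hj]

theorem gpA_mlcom_close (g : List Char) (lines : List (List Char)) (li : Int) (e : Bool)
    (hj : ¬ PySem.Chars.find g [':', '-'] = -1) :
    gpA g lines li true e =
      gpA (g.drop ((PySem.Chars.find g [':', '-']).toNat + 2)) lines li false false := by
  rw [gpA]
  simp [pvSplitOne2, hj]

theorem gpA_even (g : List Char) (lines : List (List Char)) (li : Int) :
    gpA g lines li false true = (pvAddAt lines li ('"' :: g ++ ['"']), li, false, true) := by
  rw [gpA]
  simp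

theorem gpA_unq_stop (h : List Char) (lines : List (List Char)) (li : Int)
    (hcc : PySem.Chars.find h [':', ':'] = -1)
    (hm : PySem.Chars.find h ['-', ':'] = -1) :
    gpA h lines li false false =
      (pvAddAt lines li ((PySem.Chars.splitOn h [';']).headD []) ++ (PySem.Chars.splitOn h [';']).tail,
        li + ((PySem.Chars.splitOn h [';']).tail.length : Int), false, false) := by
  rw [gpA]
  simp [pvSplitOne2, hcc, hm]

theorem gpA_unq_open (h : List Char) (lines : List (List Char)) (li : Int)
    (hcc : PySem.Chars.find h [':', ':'] = -1)
    (hm : ¬ PySem.Chars.find h ['-', ':'] = -1) :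
    gpA h lines li false false =
      gpA (h.drop ((PySem.Chars.find h ['-', ':']).toNat + 2))
        (pvAddAt lines li ((PySem.Chars.splitOn (h.take (PySem.Chars.find h ['-', ':']).toNat) [';']).headD [])
          ++ (PySem.Chars.splitOn (h.take (PySem.Chars.find h ['-', ':']).toNat) [';']).tail)
        (li + ((PySem.Chars.splitOn (h.take (PySem.Chars.find h ['-', ':']).toNat) [';']).tail.length : Int))
        true false := by
  rw [gpA]
  simp [pvSplitOne2, hcc, hm]

-- A's uncommented handling only depends on the part of the group before the first "::"
theorem gpA_cut (t : List Char) (lines : List (List Char)) (li : Int) :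
    gpA t lines li false false =
      gpA (if PySem.Chars.find t [':', ':'] < 0 then t
            else t.take (PySem.Chars.find t [':', ':']).toNat) lines li false false := by
  by_cases hf : PySem.Chars.find t [':', ':'] < 0
  · rw [if_pos hf]
  · rw [if_neg hf]
    have hcut : PySem.Chars.find (t.take (PySem.Chars.find t [':', ':']).toNat) [':', ':'] = -1 := by
      apply (PySem.Chars.find_eq_neg_one_iff _ _).mpr
      exact pvNoInfixTake t [':', ':'] (by simp) (by omega)
    have hfne : ¬ PySem.Chars.find t [':', ':'] = -1 := by
      have := PySem.Chars.neg_one_le_find t [':', ':']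
      omega
    conv_lhs => rw [gpA]
    conv_rhs => rw [gpA]
    simp [pvSplitOne2, hcut, hfne]

theorem scanUnq_stop (h : List Char) (lines : List (List Char))
    (hm : PySem.Chars.find h ['-', ':'] = -1) :
    scanUnq h lines =
      (pvAddLast lines ((PySem.Chars.splitOn h [';']).headD []) ++ (PySem.Chars.splitOn h [';']).tail,
        false) := by
  have hlt : PySem.Chars.find h ['-', ':'] < 0 := by
    have := PySem.Chars.neg_one_le_find h ['-', ':']
    omega
  rw [scanUnq]
  simp only [if_pos hlt, dif_pos hlt]

theorem scanUnq_open (h : List Char) (lines : List (List Char))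
    (hm : ¬ PySem.Chars.find h ['-', ':'] = -1)
    (hj : PySem.Chars.find (h.drop ((PySem.Chars.find h ['-', ':']).toNat + 2)) [':', '-'] = -1) :
    scanUnq h lines =
      (pvAddLast lines ((PySem.Chars.splitOn (h.take (PySem.Chars.find h ['-', ':']).toNat) [';']).headD [])
        ++ (PySem.Chars.splitOn (h.take (PySem.Chars.find h ['-', ':']).toNat) [';']).tail,
        true) := by
  have hm0 : 0 ≤ PySem.Chars.find h ['-', ':'] := by
    have := PySem.Chars.neg_one_le_find h ['-', ':']
    omega
  have hge : ¬ PySem.Chars.find h ['-', ':'] < 0 := by omega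
  have hjlt : PySem.Chars.find (h.drop ((PySem.Chars.find h ['-', ':']).toNat + 2)) [':', '-'] < 0 := by
    have := PySem.Chars.neg_one_le_find (h.drop ((PySem.Chars.find h ['-', ':']).toNat + 2)) [':', '-']
    omega
  rw [scanUnq]
  simp only [if_neg hge, dif_neg hge, if_pos hjlt]

theorem scanUnq_step (h : List Char) (lines : List (List Char))
    (hm : ¬ PySem.Chars.find h ['-', ':'] = -1)
    (hj : ¬ PySem.Chars.find (h.drop ((PySem.Chars.find h ['-', ':']).toNat + 2)) [':', '-'] = -1) :
    scanUnq h lines =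
      scanUnq ((h.drop ((PySem.Chars.find h ['-', ':']).toNat + 2)).drop
          ((PySem.Chars.find (h.drop ((PySem.Chars.find h ['-', ':']).toNat + 2)) [':', '-']).toNat + 2))
        (pvAddLast lines ((PySem.Chars.splitOn (h.take (PySem.Chars.find h ['-', ':']).toNat) [';']).headD [])
          ++ (PySem.Chars.splitOn (h.take (PySem.Chars.find h ['-', ':']).toNat) [';']).tail) := by
  have hm0 : 0 ≤ PySem.Chars.find h ['-', ':'] := by
    have := PySem.Chars.neg_one_le_find h ['-', ':']
    omega
  have hj0 : 0 ≤ PySem.Chars.find (h.drop ((PySem.Chars.find h ['-', ':']).toNat + 2)) [':', '-'] := by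
    have := PySem.Chars.neg_one_le_find (h.drop ((PySem.Chars.find h ['-', ':']).toNat + 2)) [':', '-']
    omega
  have hge : ¬ PySem.Chars.find h ['-', ':'] < 0 := by omega
  have hjge : ¬ PySem.Chars.find (h.drop ((PySem.Chars.find h ['-', ':']).toNat + 2)) [':', '-'] < 0 := by
    omega
  rw [scanUnq]
  simp only [if_neg hge, dif_neg hge, if_neg hjge]

-- core lemma: A's gp on an uncommented group with no "::" equals B's scan loop
theorem pvScanEq (n : Nat) : ∀ (h : List Char) (lines : List (List Char)),
    h.length ≤ n → lines ≠ [] → ¬ [':', ':'] <:+: h →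
    gpA h lines ((lines.length : Int) - 1) false false =
      ((scanUnq h lines).1, ((scanUnq h lines).1.length : Int) - 1,
        (scanUnq h lines).2, (scanUnq h lines).2) := by
  induction n using Nat.strong_induction_on with
  | _ n ih =>
  intro h lines hlen hne hno
  have hfcc : PySem.Chars.find h [':', ':'] = -1 :=
    (PySem.Chars.find_eq_neg_one_iff h [':', ':']).mpr hno
  have hlenpos : 0 < lines.length := List.length_pos_iff.mpr hne
  by_cases hm : PySem.Chars.find h ['-', ':'] = -1
  · rw [gpA_unq_stop h lines _ hfcc hm, scanUnq_stop h lines hm, pvAddEq lines _ hne]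
    refine Prod.ext rfl (Prod.ext ?_ rfl)
    simp
    omega
  · rw [gpA_unq_open h lines _ hfcc hm, pvAddEq lines _ hne]
    set m := (PySem.Chars.find h ['-', ':']).toNat with hmdef
    set t := h.drop (m + 2) with htdef
    set lines2 := pvAddLast lines ((PySem.Chars.splitOn (h.take m) [';']).headD []) ++
      (PySem.Chars.splitOn (h.take m) [';']).tail with hl2def
    have hl2pos : 0 < lines2.length := by
      rw [hl2def]
      simp
      omega
    have hl2ne : lines2 ≠ [] := List.length_pos_iff.mp hl2pos
    have hli2 : (lines.length : Int) - 1 + ((PySem.Chars.splitOn (h.take m) [';']).tail.length : Int)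
        = (lines2.length : Int) - 1 := by
      rw [hl2def]
      simp
      omega
    rw [hli2]
    by_cases hj : PySem.Chars.find t [':', '-'] = -1
    · rw [gpA_mlcom_stay t lines2 _ false hj, scanUnq_open h lines hm hj]
      rfl
    · rw [gpA_mlcom_close t lines2 _ false hj, scanUnq_step h lines hm hj]
      have hhne : h ≠ [] := by
        intro h0
        rw [h0, pvFindNil ['-', ':'] (by simp)] at hm
        exact hm rfl
      have hlt : (t.drop ((PySem.Chars.find t [':', '-']).toNat + 2)).length < n := by
        have h1 : 0 < h.length := List.length_pos_iff.mpr hhne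
        simp only [htdef, List.length_drop]
        omega
      exact ih _ hlt _ lines2 le_rfl hl2ne
        (pvNoInfixDrop _ _ _ (pvNoInfixDrop _ _ _ hno))


-- scanUnq never shrinks lines
theorem pvScanLen (n : Nat) : ∀ (h : List Char) (lines : List (List Char)),
    h.length ≤ n → lines.length ≤ (scanUnq h lines).1.length := by
  induction n using Nat.strong_induction_on with
  | _ n ih =>
  intro h lines hlen
  by_cases hm : PySem.Chars.find h ['-', ':'] = -1
  · rw [scanUnq_stop h lines hm]
    simp
  · set t := h.drop ((PySem.Chars.find h ['-', ':']).toNat + 2) with htdef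
    by_cases hj : PySem.Chars.find t [':', '-'] = -1
    · rw [scanUnq_open h lines hm hj]
      simp
    · rw [scanUnq_step h lines hm hj]
      have hhne : h ≠ [] := by
        intro h0
        rw [h0, pvFindNil ['-', ':'] (by simp)] at hm
        exact hm rfl
      have hlt : (t.drop ((PySem.Chars.find t [':', '-']).toNat + 2)).length < n := by
        have h1 : 0 < h.length := List.length_pos_iff.mpr hhne
        simp only [htdef, List.length_drop]
        omega
      refine le_trans ?_ (ih _ hlt _ _ le_rfl)
      simp

-- unfolding equations for altGroup
theorem altCore_eq (g : List Char) (lines : List (List Char)) :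
    altCore g lines = scanUnq (if PySem.Chars.find g [':', ':'] < 0 then g
      else g.take (PySem.Chars.find g [':', ':']).toNat) lines := rfl

theorem altGroup_mlcom_stay (g : List Char) (lines : List (List Char)) (e : Bool)
    (hj : PySem.Chars.find g [':', '-'] = -1) :
    altGroup g lines true e = (lines, true, e) := by
  have hlt : PySem.Chars.find g [':', '-'] < 0 := by
    have := PySem.Chars.neg_one_le_find g [':', '-']
    omega
  simp [altGroup, if_pos hlt]

theorem altGroup_mlcom_close (g : List Char) (lines : List (List Char)) (e : Bool)
    (hj : ¬ PySem.Chars.find g [':', '-'] = -1) :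
    altGroup g lines true e =
      ((altCore (g.drop ((PySem.Chars.find g [':', '-']).toNat + 2)) lines).1,
       (altCore (g.drop ((PySem.Chars.find g [':', '-']).toNat + 2)) lines).2, true) := by
  have hge : ¬ PySem.Chars.find g [':', '-'] < 0 := by
    have := PySem.Chars.neg_one_le_find g [':', '-']
    omega
  simp [altGroup, if_neg hge]

theorem altGroup_even (g : List Char) (lines : List (List Char)) :
    altGroup g lines false true = (pvAddLast lines ('"' :: g ++ ['"']), false, false) := by
  simp [altGroup]

theorem altGroup_unq (g : List Char) (lines : List (List Char)) :
    altGroup g lines false false = ((altCore g lines).1, (altCore g lines).2, true) := by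
  simp [altGroup]

-- per-group equivalence: A's gp step (with the caller's parity toggle) matches B's altGroup
theorem pvGroup (g : List Char) (lines : List (List Char)) (mlcom evA evB : Bool)
    (hne : lines ≠ []) (hev : mlcom = false → evA = evB) :
    ∃ L m eA eB,
      gpA g lines ((lines.length : Int) - 1) mlcom evA = (L, (L.length : Int) - 1, m, eA) ∧
      altGroup g lines mlcom evB = (L, m, eB) ∧ (m = false → (!eA) = eB) ∧ L ≠ [] := by
  have hlpos : 0 < lines.length := List.length_pos_iff.mpr hne
  cases mlcom with
  | true =>
    by_cases hj : PySem.Chars.find g [':', '-'] = -1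
    · exact ⟨lines, true, !evA, evB,
        gpA_mlcom_stay g lines _ evA hj, altGroup_mlcom_stay g lines evB hj,
        by simp, hne⟩
    · set t := g.drop ((PySem.Chars.find g [':', '-']).toNat + 2) with htdef
      set c := (if PySem.Chars.find t [':', ':'] < 0 then t
        else t.take (PySem.Chars.find t [':', ':']).toNat) with hcdef
      have hA : gpA g lines ((lines.length : Int) - 1) true evA =
          ((scanUnq c lines).1, ((scanUnq c lines).1.length : Int) - 1,
            (scanUnq c lines).2, (scanUnq c lines).2) := by
        rw [gpA_mlcom_close g lines _ evA hj, gpA_cut t lines _, ← hcdef]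
        exact pvScanEq c.length c lines le_rfl hne (by rw [hcdef]; exact pvCutNoInfix t)
      have hB : altGroup g lines true evB =
          ((scanUnq c lines).1, (scanUnq c lines).2, true) := by
        rw [altGroup_mlcom_close g lines evB hj, altCore_eq, ← htdef, ← hcdef]
      have hLne : (scanUnq c lines).1 ≠ [] := by
        have := pvScanLen c.length c lines le_rfl
        exact List.length_pos_iff.mp (by omega)
      refine ⟨(scanUnq c lines).1, (scanUnq c lines).2, (scanUnq c lines).2, true,
        hA, hB, ?_, hLne⟩
      intro hm0
      rw [hm0]
      rfl
  | false =>
    have hevAB : evA = evB := hev rfl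
    cases hA : evA with
    | true =>
      have hB : evB = true := by rw [← hevAB, hA]
      rw [hB]
      refine ⟨pvAddLast lines ('"' :: g ++ ['"']), false, true, false, ?_, altGroup_even g lines,
        by simp, ?_⟩
      · rw [gpA_even g lines _, pvAddEq lines _ hne]
        have : ((pvAddLast lines ('"' :: g ++ ['"'])).length : Int) - 1 = (lines.length : Int) - 1 := by
          simp
        rw [this]
      · have : 0 < (pvAddLast lines ('"' :: g ++ ['"'])).length := by simp; omega
        exact List.length_pos_iff.mp this
    | false =>
      have hB : evB = false := by rw [← hevAB, hA]
      rw [hB]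
      set c := (if PySem.Chars.find g [':', ':'] < 0 then g
        else g.take (PySem.Chars.find g [':', ':']).toNat) with hcdef
      have hAeq : gpA g lines ((lines.length : Int) - 1) false false =
          ((scanUnq c lines).1, ((scanUnq c lines).1.length : Int) - 1,
            (scanUnq c lines).2, (scanUnq c lines).2) := by
        rw [gpA_cut g lines _, ← hcdef]
        exact pvScanEq c.length c lines le_rfl hne (by rw [hcdef]; exact pvCutNoInfix g)
      have hBeq : altGroup g lines false false =
          ((scanUnq c lines).1, (scanUnq c lines).2, true) := by
        rw [altGroup_unq g lines, altCore_eq, ← hcdef]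
      have hLne : (scanUnq c lines).1 ≠ [] := by
        have := pvScanLen c.length c lines le_rfl
        exact List.length_pos_iff.mp (by omega)
      refine ⟨(scanUnq c lines).1, (scanUnq c lines).2, (scanUnq c lines).2, true,
        hAeq, hBeq, ?_, hLne⟩
      intro hm0
      rw [hm0]
      rfl

-- per-line equivalence: the inner folds over the quote-groups agree
theorem pvLine (groups : List (List Char)) : ∀ (lines : List (List Char)) (mlcom evA evB : Bool),
    lines ≠ [] → (mlcom = false → evA = evB) →
    ∃ L m eA eB,
      groups.foldl (fun st2 group =>
          ((gpA group st2.1 st2.2.1 st2.2.2.1 st2.2.2.2).1,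
            (gpA group st2.1 st2.2.1 st2.2.2.1 st2.2.2.2).2.1,
            (gpA group st2.1 st2.2.1 st2.2.2.1 st2.2.2.2).2.2.1,
            !(gpA group st2.1 st2.2.1 st2.2.2.1 st2.2.2.2).2.2.2))
        (lines, (lines.length : Int) - 1, mlcom, evA) = (L, (L.length : Int) - 1, m, eA) ∧
      groups.foldl (fun st2 g => altGroup g st2.1 st2.2.1 st2.2.2) (lines, mlcom, evB) = (L, m, eB) ∧
      (m = false → eA = eB) ∧ L ≠ [] := by
  induction groups with
  | nil =>
    intro lines mlcom evA evB hne hev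
    exact ⟨lines, mlcom, evA, evB, rfl, rfl, hev, hne⟩
  | cons g gs ihg =>
    intro lines mlcom evA evB hne hev
    obtain ⟨L1, m1, eA1, eB1, hA1, hB1, hev1, hne1⟩ := pvGroup g lines mlcom evA evB hne hev
    obtain ⟨L, m, eA, eB, hA, hB, hevf, hnef⟩ := ihg L1 m1 (!eA1) eB1 hne1 hev1
    refine ⟨L, m, eA, eB, ?_, ?_, hevf, hnef⟩
    · rw [List.foldl_cons]
      simpa [hA1] using hA
    · rw [List.foldl_cons]
      simpa [hB1] using hB

-- whole-body equivalence of the two outer folds over the physical lines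
theorem pvBody (raws : List (List Char)) : ∀ (lines : List (List Char)) (mlcom : Bool),
    ∃ L m,
      raws.foldl (fun st s =>
          (((PySem.Chars.splitOn (PySem.Chars.strip s) ['"']).foldl
              (fun st2 group =>
                ((gpA group st2.1 st2.2.1 st2.2.2.1 st2.2.2.2).1,
                  (gpA group st2.1 st2.2.1 st2.2.2.1 st2.2.2.2).2.1,
                  (gpA group st2.1 st2.2.1 st2.2.2.1 st2.2.2.2).2.2.1,
                  !(gpA group st2.1 st2.2.1 st2.2.2.1 st2.2.2.2).2.2.2))
              (st.1 ++ [[]], st.2.1 + 1, st.2.2, false)).1,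
            ((PySem.Chars.splitOn (PySem.Chars.strip s) ['"']).foldl
              (fun st2 group =>
                ((gpA group st2.1 st2.2.1 st2.2.2.1 st2.2.2.2).1,
                  (gpA group st2.1 st2.2.1 st2.2.2.1 st2.2.2.2).2.1,
                  (gpA group st2.1 st2.2.1 st2.2.2.1 st2.2.2.2).2.2.1,
                  !(gpA group st2.1 st2.2.1 st2.2.2.1 st2.2.2.2).2.2.2))
              (st.1 ++ [[]], st.2.1 + 1, st.2.2, false)).2.1,
            ((PySem.Chars.splitOn (PySem.Chars.strip s) ['"']).foldl
              (fun st2 group =>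
                ((gpA group st2.1 st2.2.1 st2.2.2.1 st2.2.2.2).1,
                  (gpA group st2.1 st2.2.1 st2.2.2.1 st2.2.2.2).2.1,
                  (gpA group st2.1 st2.2.1 st2.2.2.1 st2.2.2.2).2.2.1,
                  !(gpA group st2.1 st2.2.1 st2.2.2.1 st2.2.2.2).2.2.2))
              (st.1 ++ [[]], st.2.1 + 1, st.2.2, false)).2.2.1))
        (lines, (lines.length : Int) - 1, mlcom) = (L, (L.length : Int) - 1, m) ∧
      raws.foldl (fun st raw =>
          (((PySem.Chars.splitOn (PySem.Chars.strip raw) ['"']).foldl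
              (fun st2 g => altGroup g st2.1 st2.2.1 st2.2.2) (st.1 ++ [[]], st.2, false)).1,
            ((PySem.Chars.splitOn (PySem.Chars.strip raw) ['"']).foldl
              (fun st2 g => altGroup g st2.1 st2.2.1 st2.2.2) (st.1 ++ [[]], st.2, false)).2.1))
        (lines, mlcom) = (L, m) := by
  induction raws with
  | nil => intro lines mlcom; exact ⟨lines, mlcom, rfl, rfl⟩
  | cons raw rs ihr =>
    intro lines mlcom
    have hne : lines ++ [[]] ≠ ([] : List (List Char)) := by simp
    have hli : ((lines ++ [[]]).length : Int) - 1 = (lines.length : Int) := by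
      simp
    obtain ⟨L1, m1, eA1, eB1, hA1, hB1, _, hne1⟩ :=
      pvLine (PySem.Chars.splitOn (PySem.Chars.strip raw) ['"']) (lines ++ [[]]) mlcom false false
        hne (fun _ => rfl)
    obtain ⟨L, m, hA, hB⟩ := ihr L1 m1
    refine ⟨L, m, ?_, ?_⟩
    · rw [List.foldl_cons]
      rw [hli] at hA1
      simpa [hA1] using hA
    · rw [List.foldl_cons]
      simpa [hB1] using hB

-- ===== VERDICT (by name: the statement is the Claim_ definition above) =====
theorem modfile_splitlines_spec : Claim_equal_modfile_splitlines := by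
  intro body _hdom
  unfold Spec_modfile_splitlines
  simp only [modfile_splitlines, modfile_splitlines_alt]
  rw [List.foldl_map]
  obtain ⟨L, m, hA, hB⟩ := pvBody (PySem.Chars.splitOn body.toList ['\n']) [] false
  simp only [List.length_nil, Nat.cast_zero, zero_sub] at hA
  rw [hA, hB]
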